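-- pv_equiv track=rewrite | github.com/JSebastian-Villa/Analisis_de_algoritmos | repasogreedy2.py | asignar_tareas
-- ===== SOURCE A (Python) =====
-- import heapq
-- import heapq  # Librería que permite usar una cola de prioridad (min heap)
-- import heapq  # Librería para trabajar con colas de prioridad (min heap)
-- import heapq
-- import heapq
-- import heapq
--
-- def asignar_tareas(tareas, num_servidores):
--     if not tareas:
--         return 0, [[] for _ in range(num_servidores)]
--     tareas_ordenadas = sorted(enumerate(tareas), key = lambda x: -x[1])
--
--     servidores = [(0, i, [] ) for i in range(num_servidores)]
--     heapq.heapify(servidores)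
--
--     for idx_original, tiempo in tareas_ordenadas:
--         carga, id_servidor, lista = heapq.heappop(servidores)
--         lista.append(tiempo)
--         heapq.heappush(servidores, (carga + tiempo, id_servidor, lista))
--
--     tiempo_total = max(s[0] for s in servidores)
--     asignacion = [s[2] for s in sorted(servidores, key = lambda x: x[1])]
--
--     return tiempo_total, asignacion
--
-- servidores = 3
--
-- tareas = [(2,50),(1,10),(3,60),(2,30)]
-- ===== SOURCE B (Python) =====
-- def asignar_tareas(tareas, num_servidores):
--     if not tareas:
--         return 0, [[] for _ in range(num_servidores)]
--     orden = sorted(enumerate(tareas), key=lambda x: -x[1])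
--     cargas = [0] * num_servidores
--     asignacion = [[] for _ in range(num_servidores)]
--     for _, tiempo in orden:
--         j = 0
--         for k in range(1, num_servidores):
--             if cargas[k] < cargas[j]:
--                 j = k
--         cargas[j] += tiempo
--         asignacion[j].append(tiempo)
--     return max(cargas), asignacion
-- ===== Notes on version B (the rewrite author's own statement) =====
-- stated objective: simpler
-- what changed: Replaces the heapq priority queue of (load, id, task-list) tuples with two flat lists (loads and assignments) and a linear min-scan for the least-loaded server (ties by smallest index), keeping the same LPT sort and early return.
import Mathlib
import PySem

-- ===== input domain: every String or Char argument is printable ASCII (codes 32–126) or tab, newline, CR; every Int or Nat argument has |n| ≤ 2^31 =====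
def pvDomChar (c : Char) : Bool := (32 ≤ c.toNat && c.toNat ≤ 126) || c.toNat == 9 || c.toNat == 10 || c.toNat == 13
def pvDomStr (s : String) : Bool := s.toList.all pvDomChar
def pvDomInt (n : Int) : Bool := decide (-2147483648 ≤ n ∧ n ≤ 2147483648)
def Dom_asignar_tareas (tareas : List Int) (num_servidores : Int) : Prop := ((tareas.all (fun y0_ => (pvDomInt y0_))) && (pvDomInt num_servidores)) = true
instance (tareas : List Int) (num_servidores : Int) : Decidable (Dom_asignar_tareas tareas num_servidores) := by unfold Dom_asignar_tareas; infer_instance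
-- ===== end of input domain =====

-- ===== PORT A =====
-- B replaces A's heapq priority queue with two flat arrays and a linear min-scan: simpler, same results.
-- Heap model: heapq's observable contract here is "pop the lexicographically smallest (carga, id) tuple";
-- the list element order inside the heap is never observed (only max over loads and sort-by-unique-id),
-- so the heap is ported as a bag with pop-min (exact for this program).
def pvLtB (p q : Int × Int) : Bool := p.1 < q.1 || (p.1 == q.1 && p.2 < q.2)

def pvKey (s : Int × Int × List Int) : Int × Int := (s.1, s.2.1)

-- heappop's choice: the smallest element under Python tuple comparison (lists are never compared
-- because server ids are distinct, so comparing (carga, id) is exact)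
def pvFindMin : List (Int × Int × List Int) → Option (Int × Int × List Int)
  | [] => none
  | x :: xs => some (xs.foldl (fun m y => if pvLtB (pvKey y) (pvKey m) then y else m) x)

def pvHeapPop (L : List (Int × Int × List Int)) :
    Option ((Int × Int × List Int) × List (Int × Int × List Int)) :=
  match pvFindMin L with
  | none => none            -- IndexError: pop from empty heap
  | some m => some (m, L.erase m)

def pvHeapLoop : List (Int × Int) → List (Int × Int × List Int) →
    Option (List (Int × Int × List Int))
  | [], L => some L
  | (_, t) :: rest, L =>
    match pvHeapPop L with
    | none => none
    | some ((c, i, l), L') => pvHeapLoop rest (L' ++ [(c + t, i, l ++ [t])])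

def asignar_tareas (tareas : List Int) (num_servidores : Int) : Int × List (List Int) :=
  if tareas = [] then
    (0, (PySem.List.pyRange 0 num_servidores).map (fun _ => []))
  else
    let tareas_ordenadas := PySem.List.sorted (PySem.List.enumerate tareas) (fun x => -x.2)
    let servidores := (PySem.List.pyRange 0 num_servidores).map (fun i => ((0 : Int), i, ([] : List Int)))
    match pvHeapLoop tareas_ordenadas servidores with
    | none => (0, [])       -- heappop on an empty heap: IndexError (outside Pre_)
    | some L =>
      ((PySem.List.max? (L.map (fun s => s.1)) (fun y => y)).getD 0,
       (PySem.List.sorted L (fun s => s.2.1)).map (fun s => s.2.2))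

-- ===== PORT B =====
-- inner scan: j = 0; for k in range(1, num_servidores): if cargas[k] < cargas[j]: j = k
def pvArgmin (cargas : List Int) (num_servidores : Int) : Int :=
  (PySem.List.pyRange 1 num_servidores).foldl
    (fun j k => if PySem.List.pyGetD cargas k 0 < PySem.List.pyGetD cargas j 0 then k else j) 0

def asignar_tareas_alt (tareas : List Int) (num_servidores : Int) : Int × List (List Int) :=
  if tareas = [] then
    (0, (PySem.List.pyRange 0 num_servidores).map (fun _ => []))
  else
    let orden := PySem.List.sorted (PySem.List.enumerate tareas) (fun x => -x.2)
    let final := orden.foldl (fun st p =>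
      let j := pvArgmin st.1 num_servidores
      (st.1.set j.toNat (PySem.List.pyGetD st.1 j 0 + p.2),
       st.2.set j.toNat (PySem.List.pyGetD st.2 j [] ++ [p.2])))
      (PySem.List.pyRepeat [(0 : Int)] num_servidores,
       (PySem.List.pyRange 0 num_servidores).map (fun _ => ([] : List Int)))
    ((PySem.List.max? final.1 (fun y => y)).getD 0, final.2)

-- ===== PRECONDITION & SPEC =====
-- Pre_ excludes only the inputs where A raises: num_servidores < 1 with non-empty tareas
-- (heappop from an empty heap raises IndexError; B raises IndexError there too).
def Pre_asignar_tareas (tareas : List Int) (num_servidores : Int) : Prop :=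
  tareas = [] ∨ 1 ≤ num_servidores

instance (tareas : List Int) (num_servidores : Int) : Decidable (Pre_asignar_tareas tareas num_servidores) := by
  unfold Pre_asignar_tareas; infer_instance

def pvWitness_asignar_tareas : List Int × Int := ([5, 3, 8, 1], 2)

def Spec_asignar_tareas (tareas : List Int) (num_servidores : Int) (out : Int × List (List Int)) : Prop := out = asignar_tareas_alt tareas num_servidores
instance (tareas : List Int) (num_servidores : Int) (out : Int × List (List Int)) : Decidable (Spec_asignar_tareas tareas num_servidores out) := by unfold Spec_asignar_tareas; infer_instance

-- ===== CLAIM (what is proved, stated in full; the proofs are below) =====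
def Claim_equal_asignar_tareas : Prop := ∀ (tareas : List Int) (num_servidores : Int), Dom_asignar_tareas tareas num_servidores → Pre_asignar_tareas tareas num_servidores → Spec_asignar_tareas tareas num_servidores (asignar_tareas tareas num_servidores)

-- ===== LEMMAS AND PROOFS =====

-- canonical server state: server j carries load c[j] and task list a[j]
def pvCanon (c : List Int) (a : List (List Int)) : List (Int × Int × List Int) :=
  (List.range c.length).map (fun j => (c.getD j 0, (j : Int), a.getD j []))

-- B's step on the flat state
def pvStepB (n : Int) (st : List Int × List (List Int)) (p : Int × Int) : List Int × List (List Int) :=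
  let j := pvArgmin st.1 n
  (st.1.set j.toNat (PySem.List.pyGetD st.1 j 0 + p.2),
   st.2.set j.toNat (PySem.List.pyGetD st.2 j [] ++ [p.2]))

lemma pvLtB_true_iff (p q : Int × Int) :
    pvLtB p q = true ↔ (p.1 < q.1 ∨ (p.1 = q.1 ∧ p.2 < q.2)) := by
  simp [pvLtB]

lemma pvLtB_false_iff (p q : Int × Int) :
    pvLtB p q = false ↔ (q.1 < p.1 ∨ (q.1 = p.1 ∧ q.2 ≤ p.2)) := by
  rw [← Bool.not_eq_true, pvLtB_true_iff]; omega

lemma pvFoldMin_spec (xs : List (Int × Int × List Int)) : ∀ (x : Int × Int × List Int),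
    (xs.foldl (fun m y => if pvLtB (pvKey y) (pvKey m) then y else m) x) ∈ x :: xs ∧
    ∀ y ∈ x :: xs,
      pvLtB (pvKey y) (pvKey (xs.foldl (fun m y => if pvLtB (pvKey y) (pvKey m) then y else m) x)) = false := by
  induction xs with
  | nil =>
    intro x
    simp only [List.foldl_nil]
    refine ⟨by simp, ?_⟩
    intro y hy
    simp only [List.mem_singleton] at hy
    subst hy
    rw [pvLtB_false_iff]; omega
  | cons z zs ih =>
    intro x
    simp only [List.foldl_cons]
    by_cases hzx : pvLtB (pvKey z) (pvKey x) = true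
    · rw [if_pos hzx]
      obtain ⟨hmem, hmin⟩ := ih z
      refine ⟨List.mem_cons_of_mem x hmem, ?_⟩
      intro y hy
      rcases List.mem_cons.mp hy with rfl | hy2
      · have h1 := hmin z (List.mem_cons_self ..)
        rw [pvLtB_true_iff] at hzx
        rw [pvLtB_false_iff] at h1 ⊢
        omega
      · exact hmin y hy2
    · rw [if_neg hzx]
      obtain ⟨hmem, hmin⟩ := ih x
      constructor
      · rcases List.mem_cons.mp hmem with h | h
        · simp [h]
        · simp [h]
      · intro y hy
        rcases List.mem_cons.mp hy with rfl | hy2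
        · exact hmin y (List.mem_cons_self ..)
        · rcases List.mem_cons.mp hy2 with rfl | hy3
          · have h1 := hmin x (List.mem_cons_self ..)
            rw [Bool.not_eq_true, pvLtB_false_iff] at hzx
            rw [pvLtB_false_iff] at h1 ⊢
            omega
          · exact hmin y (List.mem_cons_of_mem _ hy3)

lemma pvFindMin_spec (x : Int × Int × List Int) (xs : List (Int × Int × List Int)) :
    ∃ m, pvFindMin (x :: xs) = some m ∧ m ∈ x :: xs ∧
      ∀ y ∈ x :: xs, pvLtB (pvKey y) (pvKey m) = false := by
  obtain ⟨h1, h2⟩ := pvFoldMin_spec xs x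
  exact ⟨_, rfl, h1, h2⟩

lemma pvArgmin_aux (c : List Int) : ∀ (m : Nat), 1 ≤ m →
    ∃ jn : Nat,
      ((PySem.List.pyRange 1 (m : Int)).foldl
        (fun j k => if PySem.List.pyGetD c k 0 < PySem.List.pyGetD c j 0 then k else j) 0) = (jn : Int) ∧
      jn < m ∧ (∀ k, k < m → c.getD jn 0 ≤ c.getD k 0) ∧ (∀ k, k < jn → c.getD jn 0 < c.getD k 0) := by
  intro m hm
  induction m, hm using Nat.le_induction with
  | base =>
    refine ⟨0, ?_, by omega, ?_, by omega⟩
    · norm_num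
    · intro k hk
      interval_cases k
      exact le_refl _
  | succ m hm ih =>
    obtain ⟨jn, hfold, hlt, hle, hstrict⟩ := ih
    have hcast : ((m + 1 : Nat) : Int) = (m : Int) + 1 := by push_cast; ring
    rw [hcast, PySem.List.pyRange_one_succ_right (by exact_mod_cast hm), List.foldl_append,
        hfold, List.foldl_cons, List.foldl_nil, PySem.List.pyGetD_natCast, PySem.List.pyGetD_natCast]
    by_cases h : c.getD m 0 < c.getD jn 0
    · rw [if_pos h]
      refine ⟨m, rfl, by omega, ?_, ?_⟩
      · intro k hk
        rcases Nat.lt_succ_iff_lt_or_eq.mp hk with hk | rfl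
        · exact le_of_lt (lt_of_lt_of_le h (hle k hk))
        · exact le_refl _
      · intro k hk
        exact lt_of_lt_of_le h (hle k (by omega))
    · rw [if_neg h]
      refine ⟨jn, rfl, by omega, ?_, hstrict⟩
      intro k hk
      rcases Nat.lt_succ_iff_lt_or_eq.mp hk with hk | rfl
      · exact hle k hk
      · omega

lemma pvArgmin_spec (c : List Int) (n : Int) (hc : c.length = n.toNat) (hn : 1 ≤ n) :
    ∃ jn : Nat, pvArgmin c n = (jn : Int) ∧ jn < c.length ∧
      (∀ k, k < c.length → c.getD jn 0 ≤ c.getD k 0) ∧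
      (∀ k, k < jn → c.getD jn 0 < c.getD k 0) := by
  have hn' :1 ≤ n.toNat := by omega
  obtain ⟨jn, hfold, hlt, hle, hstrict⟩ := pvArgmin_aux c n.toNat hn'
  rw [hc]
  refine ⟨jn, ?_, hlt, hle, hstrict⟩
  unfold pvArgmin
  rw [show n = ((n.toNat : Nat) : Int) by omega] at *
  exact hfold

lemma pvCanon_set (c : List Int) (a : List (List Int)) (jn : Nat) (v : Int) (w : List Int)
    (_hj : jn < c.length) (ha : a.length = c.length) :
    pvCanon (c.set jn v) (a.set jn w) = (pvCanon c a).set jn (v, (jn : Int), w) := by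
  apply List.ext_getElem
  · simp [pvCanon]
  · intro i h1 h2
    simp only [pvCanon, List.length_set, List.getElem_map, List.getElem_range, List.length_map,
      List.length_range] at h1 ⊢
    rw [List.getElem_set]
    by_cases hij : jn = i
    · subst hij
      simp [List.getD, h1, ha]
    · simp [List.getD, hij, h1, ha]

lemma pvCanon_getElem (c : List Int) (a : List (List Int)) (jn : Nat) (h : jn < (pvCanon c a).length) :
    (pvCanon c a)[jn] = (c.getD jn 0, (jn : Int), a.getD jn []) := by
  simp [pvCanon]

lemma pvCanon_take (c : List Int) (a : List (List Int)) (jn : Nat) :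
    (pvCanon c a).take jn = (List.range jn).map (fun j => (c.getD j 0, (j : Int), a.getD j [])) ∨
    jn > c.length := by
  by_cases h : jn ≤ c.length
  · left
    rw [pvCanon, ← List.map_take, List.take_range, Nat.min_eq_left h]
  · right; omega

lemma pvStep_sim (n : Int) (hn : 1 ≤ n) (c : List Int) (a : List (List Int))
    (L : List (Int × Int × List Int)) (t : Int × Int)
    (hc : c.length = n.toNat) (ha : a.length = c.length) (hperm : L.Perm (pvCanon c a)) :
    ∃ L', (match pvHeapPop L with
           | none => none
           | some ((cc, i, l), L0) => some (L0 ++ [(cc + t.2, i, l ++ [t.2])])) = some L' ∧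
      L'.Perm (pvCanon (pvStepB n (c, a) t).1 (pvStepB n (c, a) t).2) := by
  obtain ⟨jn, hargj, hjlt, hle, hstrict⟩ := pvArgmin_spec c n hc hn
  set u : Int × Int × List Int := (c.getD jn 0, (jn : Int), a.getD jn []) with hu
  have hclen : (pvCanon c a).length = c.length := by simp [pvCanon]
  have humem : u ∈ pvCanon c a := by
    rw [pvCanon]
    exact List.mem_map.mpr ⟨jn, List.mem_range.mpr hjlt, rfl⟩
  have hmemc : ∀ y ∈ pvCanon c a, ∃ k, k < c.length ∧ y = (c.getD k 0, (k : Int), a.getD k []) := by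
    intro y hy
    rw [pvCanon] at hy
    obtain ⟨k, hk, rfl⟩ := List.mem_map.mp hy
    exact ⟨k, List.mem_range.mp hk, rfl⟩
  -- u is the strict lexicographic minimum of the canonical state
  have hminu : ∀ y ∈ pvCanon c a, y ≠ u → pvLtB (pvKey u) (pvKey y) = true := by
    intro y hy hne
    obtain ⟨k, hk, rfl⟩ := hmemc y hy
    have hkj : k ≠ jn := by rintro rfl; exact hne rfl
    rw [pvLtB_true_iff]
    simp only [pvKey, hu]
    have h1 := hle k hk
    rcases lt_or_eq_of_le h1 with h2 | h2
    · left; exact h2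
    · right
      refine ⟨h2, ?_⟩
      have : ¬ k < jn := fun hlt' => absurd h2 (ne_of_lt (hstrict k hlt'))
      have : jn < k := by omega
      exact_mod_cast this
  -- L is non-empty
  have hLlen : L.length = c.length := by rw [hperm.length_eq, hclen]
  match L, hperm, hLlen with
  | [], _, hLlen => simp at hLlen; omega
  | x :: xs, hperm, hLlen =>
  obtain ⟨m, hfm, hmm, hmspec⟩ := pvFindMin_spec x xs
  have hmu : m = u := by
    by_contra hne
    have h1 := hminu m (hperm.mem_iff.mp hmm) hne
    have h2 := hmspec u (hperm.mem_iff.mpr humem)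
    rw [h1] at h2
    exact Bool.noConfusion h2
  subst hmu
  have hpop : pvHeapPop (x :: xs) = some (u, (x :: xs).erase u) := by
    rw [pvHeapPop, hfm]
  rw [hpop]
  refine ⟨_, rfl, ?_⟩
  -- identify B's step
  set u' : Int × Int × List Int := (c.getD jn 0 + t.2, (jn : Int), a.getD jn [] ++ [t.2]) with hu'
  have hB : pvStepB n (c, a) t = (c.set jn (c.getD jn 0 + t.2), a.set jn (a.getD jn [] ++ [t.2])) := by
    rw [pvStepB]
    simp only [hargj, Int.toNat_natCast, PySem.List.pyGetD_natCast]
  rw [hB]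
  rw [pvCanon_set c a jn _ _ hjlt ha]
  -- split the canonical list around position jn
  have hT := (pvCanon_take c a jn).resolve_right (by omega)
  have huT : u ∉ (pvCanon c a).take jn := by
    rw [hT]
    intro hmem'
    obtain ⟨i, hi, heq⟩ := List.mem_map.mp hmem'
    have hii : (i : Int) = (jn : Int) := congrArg (fun z => z.2.1) heq
    have := List.mem_range.mp hi
    omega
  have hdrop : (pvCanon c a).drop jn = u :: (pvCanon c a).drop (jn + 1) := by
    rw [← List.getElem_cons_drop (show jn < (pvCanon c a).length by rw [hclen]; exact hjlt),
        pvCanon_getElem]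
  have herase : (pvCanon c a).erase u =
      (pvCanon c a).take jn ++ (pvCanon c a).drop (jn + 1) := by
    conv_lhs => rw [← List.take_append_drop jn (pvCanon c a), hdrop]
    rw [List.erase_append_right _ huT, List.erase_cons_head]
  have hset : (pvCanon c a).set jn u' =
      (pvCanon c a).take jn ++ u' :: (pvCanon c a).drop (jn + 1) := by
    exact List.set_eq_take_cons_drop u' (by rw [hclen]; exact hjlt)
  rw [hset]
  refine ((hperm.erase u).append_right [u']).trans ?_
  rw [herase]
  exact (List.perm_append_singleton u' _).trans List.perm_middle.symm

lemma pvStepB_lengths (n : Int) (st : List Int × List (List Int)) (t : Int × Int) :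
    (pvStepB n st t).1.length = st.1.length ∧ (pvStepB n st t).2.length = st.2.length := by
  simp [pvStepB]

lemma pvLoop_sim (n : Int) (hn : 1 ≤ n) :
    ∀ (ts : List (Int × Int)) (c : List Int) (a : List (List Int)) (L : List (Int × Int × List Int)),
    c.length = n.toNat → a.length = c.length → L.Perm (pvCanon c a) →
    ∃ L', pvHeapLoop ts L = some L' ∧
      L'.Perm (pvCanon (ts.foldl (pvStepB n) (c, a)).1 (ts.foldl (pvStepB n) (c, a)).2) := by
  intro ts
  induction ts with
  | nil =>
    intro c a L hc ha hperm
    exact ⟨L, rfl, by simpa using hperm⟩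
  | cons t ts ih =>
    intro c a L hc ha hperm
    obtain ⟨t1, t2⟩ := t
    obtain ⟨L₁, hmatch, hperm₁⟩ := pvStep_sim n hn c a L (t1, t2) hc ha hperm
    have hlen := pvStepB_lengths n (c, a) (t1, t2)
    obtain ⟨L', hloop, hperm'⟩ := ih (pvStepB n (c, a) (t1, t2)).1 (pvStepB n (c, a) (t1, t2)).2 L₁
      (by rw [hlen.1]; exact hc) (by rw [hlen.1, hlen.2]; exact ha) hperm₁
    refine ⟨L', ?_, ?_⟩
    · rw [pvHeapLoop]
      cases hpop : pvHeapPop L with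
      | none => rw [hpop] at hmatch; simp at hmatch
      | some pr =>
        obtain ⟨⟨cc, i, l⟩, L0⟩ := pr
        rw [hpop] at hmatch
        dsimp only at hmatch ⊢
        simp only [Option.some.injEq] at hmatch
        rw [hmatch]
        exact hloop
    · simpa [List.foldl_cons, Prod.mk.eta] using hperm'

lemma pvMapGetD_range {α : Type} (l : List α) (d : α) :
    (List.range l.length).map (fun j => l.getD j d) = l := by
  apply List.ext_getElem
  · simp
  · intro i h1 h2
    simp [List.getElem?_eq_getElem h2]

lemma pvCanon_map_fst (c : List Int) (a : List (List Int)) :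
    (pvCanon c a).map (fun s => s.1) = c := by
  rw [pvCanon, List.map_map]
  exact pvMapGetD_range c 0

lemma pvCanon_map_asgn (c : List Int) (a : List (List Int)) (ha : a.length = c.length) :
    (pvCanon c a).map (fun s => s.2.2) = a := by
  rw [pvCanon, List.map_map, ← ha]
  exact pvMapGetD_range a []

lemma pvCanon_pairwise (c : List Int) (a : List (List Int)) :
    (pvCanon c a).Pairwise (fun s t => s.2.1 < t.2.1) := by
  rw [pvCanon, List.pairwise_map]
  exact List.pairwise_lt_range.imp (fun h => by simpa using h)

lemma pvMaxVal_perm (xs ys : List Int) (h : xs.Perm ys) :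
    (PySem.List.max? xs (fun y => y)).getD 0 = (PySem.List.max? ys (fun y => y)).getD 0 := by
  cases hx : PySem.List.max? xs (fun y => y) with
  | none =>
    rw [PySem.List.max?_eq_none_iff] at hx
    subst hx
    rw [h.symm.eq_nil, (PySem.List.max?_eq_none_iff _ _).mpr rfl]
  | some m =>
    cases hy : PySem.List.max? ys (fun y => y) with
    | none =>
      rw [PySem.List.max?_eq_none_iff] at hy
      subst hy
      rw [h.eq_nil, (PySem.List.max?_eq_none_iff _ _).mpr rfl] at hx
      simp at hx
    | some m' =>
      simp only [Option.getD_some]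
      have h1 := PySem.List.max?_isMax hx
      have h2 := PySem.List.max?_isMax hy
      have hm := PySem.List.max?_mem hx
      have hm' := PySem.List.max?_mem hy
      exact le_antisymm (h2 m (h.mem_iff.mp hm)) (h1 m' (h.mem_iff.mpr hm'))

lemma pvFoldB_lengths (n : Int) (ts : List (Int × Int)) :
    ∀ (st : List Int × List (List Int)),
    (ts.foldl (pvStepB n) st).1.length = st.1.length ∧
    (ts.foldl (pvStepB n) st).2.length = st.2.length := by
  induction ts with
  | nil => intro st; exact ⟨rfl, rfl⟩
  | cons t ts ih =>
    intro st
    rw [List.foldl_cons]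
    obtain ⟨h1, h2⟩ := ih (pvStepB n st t)
    obtain ⟨h3, h4⟩ := pvStepB_lengths n st t
    exact ⟨h1.trans h3, h2.trans h4⟩

-- ===== VERDICT (by name: the statement is the Claim_ definition above) =====
theorem asignar_tareas_spec : Claim_equal_asignar_tareas := by
  intro tareas n _hdom hpre
  unfold Spec_asignar_tareas
  by_cases htar : tareas = []
  · simp only [asignar_tareas, asignar_tareas_alt, if_pos htar]
  · have hn : 1 ≤ n := hpre.resolve_left htar
    have hN : n.toNat = n := by omega
    simp only [asignar_tareas, asignar_tareas_alt, if_neg htar]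
    set c0 : List Int := PySem.List.pyRepeat [(0 : Int)] n with hc0
    set a0 : List (List Int) := (PySem.List.pyRange 0 n).map (fun _ => ([] : List Int)) with ha0
    have hc0' : c0 = List.replicate n.toNat 0 := PySem.List.pyRepeat_singleton 0 n
    have hrange : PySem.List.pyRange 0 n = List.map (fun k : Nat => (k : Int)) (List.range n.toNat) := by
      conv_lhs => rw [← hN]
      exact PySem.List.pyRange_zero_natCast n.toNat
    have hc0len : c0.length = n.toNat := by rw [hc0', List.length_replicate]
    have ha0len : a0.length = c0.length := by
      rw [ha0, hrange, hc0len, List.length_map, List.length_map, List.length_range]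
    have hinit : (PySem.List.pyRange 0 n).map (fun i => ((0 : Int), i, ([] : List Int))) =
        pvCanon c0 a0 := by
      apply List.ext_getElem
      · simp [pvCanon, hrange, hc0len]
      · intro i h1 h2
        rw [hrange] at h1
        simp only [List.length_map, List.length_range] at h1
        simp [pvCanon, hrange, hc0', ha0,
          List.getElem?_eq_getElem (show i < (List.range n.toNat).length by simpa using h1)]
    obtain ⟨L', hloop, hperm'⟩ := pvLoop_sim n hn
      (PySem.List.sorted (PySem.List.enumerate tareas) (fun x => -x.2)) c0 a0
      (pvCanon c0 a0) hc0len ha0len (List.Perm.refl _)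
    rw [hinit, hloop]
    dsimp only
    set F := (PySem.List.sorted (PySem.List.enumerate tareas) (fun x => -x.2)).foldl
      (pvStepB n) (c0, a0) with hF
    have hFlen := pvFoldB_lengths n
      (PySem.List.sorted (PySem.List.enumerate tareas) (fun x => -x.2)) (c0, a0)
    have hsorted : PySem.List.sorted L' (fun s => s.2.1) = pvCanon F.1 F.2 :=
      PySem.List.sorted_eq_of_perm_of_pairwise_lt _ _ _ hperm'.symm (pvCanon_pairwise _ _)
    have hfold : (List.foldl
        (fun st p =>
          (st.1.set (pvArgmin st.1 n).toNat (PySem.List.pyGetD st.1 (pvArgmin st.1 n) 0 + p.2),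
            st.2.set (pvArgmin st.1 n).toNat (PySem.List.pyGetD st.2 (pvArgmin st.1 n) [] ++ [p.2])))
        (c0, a0) (PySem.List.sorted (PySem.List.enumerate tareas) fun x => -x.2)) = F := rfl
    rw [hfold, Prod.mk.injEq]
    constructor
    · exact pvMaxVal_perm _ _ ((hperm'.map (fun s => s.1)).trans
        (by rw [pvCanon_map_fst]))
    · rw [hsorted, pvCanon_map_asgn F.1 F.2 (hFlen.2.trans (ha0len.trans hFlen.1.symm))]
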